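-- pv_equiv track=rewrite | github.com/AKleriX/codewars-tasks | Finding Arrows in a String/task-solution.py | arrow_search
-- ===== SOURCE A (Python) =====
-- def arrow_search(s: str) -> int:
--     a = i = 0
--     while i < len(s):
--         if s[i] == '<':                          # left-facing
--             j = i + 1
--             t = s[j] if j < len(s) and s[j] in '-=' else ''
--             while t and j < len(s) and s[j] == t:
--                 j += 1
--             if t and j < len(s) and s[j] == '>':   # double-sided
--                 i = j
--                 continue
--             a -= (j - i if t else 1) * (2 if t == '=' else 1)
--             i = j
--         elif s[i] == '>':                        # right-facing
--             j = i - 1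
--             t = s[j] if j >= 0 and s[j] in '-=' else ''
--             while t and j >= 0 and s[j] == t:
--                 j -= 1
--             l = i - j - 1 if t else 0
--             if l and j >= 0 and s[j] == '<':       # double-sided
--                 i += 1
--                 continue
--             a += (l + 1) * (2 if t == '=' else 1)
--             i += 1
--         else:
--             i += 1
--     return a
-- ===== SOURCE B (Python) =====
-- def arrow_search(s: str) -> int:
--     # One-pass finite-state machine: no index arithmetic, no backward scans.
--     # States: 'n' neutral; 'l' just after a '<'; ('L', c, k) '<' followed by a
--     # run of k shaft chars c; ('R', c, k) a bare run of k shaft chars c.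
--     MULT = {'-': 1, '=': 2}
--     state, a = 'n', 0
--     for x in s:
--         if state == 'n':
--             if x == '<':
--                 state = 'l'
--             elif x == '>':
--                 a += 1
--             elif x in MULT:
--                 state = ('R', x, 1)
--         elif state == 'l':
--             if x == '<':
--                 a -= 1                      # previous '<' was a bare left arrow
--             elif x == '>':
--                 state = 'n'                 # bare '<' (-1) and bare '>' (+1) cancel
--             elif x in MULT:
--                 state = ('L', x, 1)
--             else:
--                 a -= 1
--                 state = 'n'
--         elif state[0] == 'L':
--             _, c, k = state
--             if x == c:
--                 state = ('L', c, k + 1)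
--             elif x == '>':
--                 state = 'n'                 # double-sided arrow scores 0
--             else:
--                 a -= (k + 1) * MULT[c]      # completed left arrow
--                 if x == '<':
--                     state = 'l'
--                 elif x in MULT:
--                     state = ('R', x, 1)
--                 else:
--                     state = 'n'
--         else:
--             _, c, k = state
--             if x == c:
--                 state = ('R', c, k + 1)
--             elif x == '>':
--                 a += (k + 1) * MULT[c]      # completed right arrow
--                 state = 'n'
--             elif x == '<':
--                 state = 'l'
--             elif x in MULT:
--                 state = ('R', x, 1)
--             else:
--                 state = 'n'
--     if state == 'l':
--         a -= 1
--     elif state != 'n' and state[0] == 'L':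
--         a -= (state[2] + 1) * MULT[state[1]]
--     return a
-- ===== Notes on version B (the rewrite author's own statement) =====
-- stated objective: alternative
-- what changed: A scans with an index, running an inner forward while-loop after each '<' and an inner backward while-loop before each '>'; B is a single left-to-right pass driven by a four-state finite-state machine (neutral / after-'<' / '<'+run / bare run) that never re-reads a character and uses no index arithmetic.
import Mathlib
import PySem

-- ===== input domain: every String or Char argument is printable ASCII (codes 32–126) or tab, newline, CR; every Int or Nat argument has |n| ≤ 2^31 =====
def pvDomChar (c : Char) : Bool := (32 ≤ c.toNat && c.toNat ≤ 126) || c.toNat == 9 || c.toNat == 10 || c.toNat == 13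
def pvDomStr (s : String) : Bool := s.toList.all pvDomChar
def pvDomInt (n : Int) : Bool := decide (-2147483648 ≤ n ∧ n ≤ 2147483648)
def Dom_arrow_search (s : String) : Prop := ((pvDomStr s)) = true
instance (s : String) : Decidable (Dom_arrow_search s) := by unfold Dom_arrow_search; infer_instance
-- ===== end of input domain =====

-- B replaces A's index-jumping scans (forward run scan after '<', backward run
-- scan before '>') by a single left-to-right finite-state machine; objective:
-- alternative (same O(n) cost, no index arithmetic).

-- ===== PORT A =====
-- "s[j] if … and s[j] in '-=' else ''" : the optional shaft character
def pvShaftOpt (o : Option Char) : Option Char :=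
  match o with
  | some d => if d = '-' ∨ d = '=' then some d else none
  | none => none

-- inner "while t and j < len(s) and s[j] == t: j += 1"
def aFwd (s : List Char) (t : Char) (j : Nat) : Nat :=
  if h : j < s.length ∧ s[j]? = some t then aFwd s t (j + 1) else j
termination_by s.length - j
decreasing_by omega

-- the port's termination needs this (the forward scan never moves j backwards)
theorem le_aFwd (s : List Char) (t : Char) (j : Nat) : j ≤ aFwd s t j := by
  rw [aFwd]
  split
  · exact Nat.le_trans (Nat.le_succ j) (le_aFwd s t (j + 1))
  · exact Nat.le_refl j
termination_by s.length - j
decreasing_by rename_i h; have := h.1; omega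

-- inner "while t and j >= 0 and s[j] == t: j -= 1"  (j may end at -1, so Int)
def aBwd (s : List Char) (t : Char) (j : Int) : Int :=
  if h : 0 ≤ j ∧ PySem.List.pyGet? s j = some t then aBwd s t (j - 1) else j
termination_by (j + 1).toNat
decreasing_by omega

-- the outer "while i < len(s)" loop, state (a, i)
def aLoop (s : List Char) (a : Int) (i : Nat) : Int :=
  if hi : i < s.length then
    if s[i] = '<' then
      match pvShaftOpt s[i + 1]? with
      | none => aLoop s (a - 1) (i + 1)                      -- a -= 1*1 ; i = j = i+1
      | some tc =>
        let j := aFwd s tc (i + 1)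
        if s[j]? = some '>' then aLoop s a j                 -- double-sided: continue
        else aLoop s (a - ((j : Int) - (i : Int)) * (if tc = '=' then 2 else 1)) j
    else if s[i] = '>' then
      match (if 1 ≤ i then pvShaftOpt s[i - 1]? else none) with
      | none => aLoop s (a + 1) (i + 1)                      -- l = 0 ; a += 1*mult('')
      | some tc =>
        let j := aBwd s tc ((i : Int) - 1)
        let l := (i : Int) - j - 1
        if l ≠ 0 ∧ 0 ≤ j ∧ PySem.List.pyGet? s j = some '<' then aLoop s a (i + 1)
        else aLoop s (a + (l + 1) * (if tc = '=' then 2 else 1)) (i + 1)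
    else aLoop s a (i + 1)
  else a
termination_by s.length - i
decreasing_by
  all_goals first
    | omega
    | (have := le_aFwd s tc (i + 1); omega)

def arrow_search (s : String) : Int := aLoop s.toList 0 0

-- ===== PORT B =====
inductive PvSt
  | n                     -- neutral
  | l                     -- just saw '<'
  | L : Char → Nat → PvSt -- '<' then a run of k shaft chars c
  | R : Char → Nat → PvSt -- a bare run of k shaft chars c
deriving DecidableEq, Repr

def pvMult (c : Char) : Int := if c = '=' then 2 else 1

def pvIsShaft (c : Char) : Bool := c = '-' || c = '='

def pvStep : PvSt × Int → Char → PvSt × Int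
  | (.n, a), x =>
    if x = '<' then (.l, a)
    else if x = '>' then (.n, a + 1)
    else if pvIsShaft x then (.R x 1, a)
    else (.n, a)
  | (.l, a), x =>
    if x = '<' then (.l, a - 1)
    else if x = '>' then (.n, a)          -- bare '<' (-1) and bare '>' (+1) cancel
    else if pvIsShaft x then (.L x 1, a)
    else (.n, a - 1)
  | (.L c k, a), x =>
    if x = c then (.L c (k + 1), a)
    else if x = '>' then (.n, a)          -- double-sided arrow scores 0
    else
      let a' := a - ((k : Int) + 1) * pvMult c   -- completed left arrow
      if x = '<' then (.l, a')
      else if pvIsShaft x then (.R x 1, a')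
      else (.n, a')
  | (.R c k, a), x =>
    if x = c then (.R c (k + 1), a)
    else if x = '>' then (.n, a + ((k : Int) + 1) * pvMult c)  -- completed right arrow
    else if x = '<' then (.l, a)
    else if pvIsShaft x then (.R x 1, a)
    else (.n, a)

def pvFlush : PvSt × Int → Int
  | (.l, a) => a - 1
  | (.L c k, a) => a - ((k : Int) + 1) * pvMult c
  | (_, a) => a

def arrow_search_alt (s : String) : Int := pvFlush (s.toList.foldl pvStep (.n, 0))

-- ===== PRECONDITION & SPEC =====
def Spec_arrow_search (s : String) (out : Int) : Prop := out = arrow_search_alt s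
instance (s : String) (out : Int) : Decidable (Spec_arrow_search s out) := by unfold Spec_arrow_search; infer_instance

-- ===== CLAIM (what is proved, stated in full; the proofs are below) =====
def Claim_equal_arrow_search : Prop := ∀ (s : String), Dom_arrow_search s → Spec_arrow_search s (arrow_search s)

-- ===== LEMMAS AND PROOFS =====

-- emission-only view of the DFA: total it will still add from state st on input l
def dfaE : PvSt → List Char → Int
  | st, [] => pvFlush (st, 0)
  | st, x :: l => (pvStep (st, 0) x).2 + dfaE (pvStep (st, 0) x).1 l

theorem pvStep_split (st : PvSt) (a : Int) (x : Char) :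
    pvStep (st, a) x = ((pvStep (st, 0) x).1, a + (pvStep (st, 0) x).2) := by
  cases st <;> simp only [pvStep] <;> split_ifs <;> simp <;> ring

theorem pvFlush_foldl (l : List Char) (st : PvSt) (a : Int) :
    pvFlush (l.foldl pvStep (st, a)) = a + dfaE st l := by
  induction l generalizing st a with
  | nil => cases st <;> simp [pvFlush, dfaE] <;> ring
  | cons x l ih =>
    simp only [List.foldl_cons, dfaE, pvStep_split st a x, ih]
    ring

-- structural meaning of a DFA state: what the processed prefix must end with
def pvRel : PvSt → List Char → Prop
  | .n, p => p = [] ∨ ∃ q d, p = q ++ [d] ∧ d ≠ '<' ∧ d ≠ '-' ∧ d ≠ '='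
  | .l, p => ∃ q, p = q ++ ['<']
  | .L c k, p => (c = '-' ∨ c = '=') ∧ 1 ≤ k ∧ ∃ q, p = q ++ '<' :: List.replicate k c
  | .R c k, p => (c = '-' ∨ c = '=') ∧ 1 ≤ k ∧
      ∃ q, p = q ++ List.replicate k c ∧ (q = [] ∨ ∃ q' d, q = q' ++ [d] ∧ d ≠ c ∧ d ≠ '<')

-- what A has already charged for the prefix but the DFA will still emit
def pvCorr : PvSt → List Char → Int
  | .l, _ => 1
  | .L c k, l => if l.head? = some '>' then 0 else ((k : Int) + 1) * pvMult c
  | _, _ => 0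

-- state/suffix pairs A's control flow can actually reach
def pvCompat : PvSt → List Char → Prop
  | .l, l => l.head? ≠ some '-' ∧ l.head? ≠ some '='
  | .L c _, l => l.head? ≠ some c
  | _, _ => True

-- split a list into its leading run of c and the rest
def runSplit (c : Char) : List Char → Nat × List Char
  | [] => (0, [])
  | x :: l => if x = c then ((runSplit c l).1 + 1, (runSplit c l).2) else (0, x :: l)

-- index bookkeeping helpers
theorem pv_get_mid (p l : List Char) (x : Char) (h : p.length < (p ++ x :: l).length) :
    (p ++ x :: l)[p.length] = x := by
  rw [List.getElem_append_right (Nat.le_refl p.length)]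
  simp

theorem pv_get?_at (q r : List Char) (d : Char) : (q ++ d :: r)[q.length]? = some d := by
  rw [List.getElem?_append_right (Nat.le_refl q.length)]
  simp

theorem pv_get?_succ (p l : List Char) (x : Char) :
    (p ++ x :: l)[p.length + 1]? = l.head? := by
  have h1 : p ++ x :: l = (p ++ [x]) ++ l := by simp
  have h2 : p.length + 1 = (p ++ [x]).length := by simp
  rw [h1, h2, List.getElem?_append_right (Nat.le_refl _)]
  simp [List.head?_eq_getElem?]

theorem runSplit_spec (c : Char) (l : List Char) :
    l = List.replicate (runSplit c l).1 c ++ (runSplit c l).2 ∧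
      (runSplit c l).2.head? ≠ some c := by
  induction l with
  | nil => simp [runSplit]
  | cons x l ih =>
    by_cases hx : x = c
    · subst hx
      have h1 : (runSplit x (x :: l)).1 = (runSplit x l).1 + 1 := by simp [runSplit]
      have h2 : (runSplit x (x :: l)).2 = (runSplit x l).2 := by simp [runSplit]
      rw [h1, h2, List.replicate_succ]
      exact ⟨by simpa using ih.1, ih.2⟩
    · simp [runSplit, hx]

theorem aFwd_spec (pre : List Char) (c : Char) (k : Nat) (r : List Char)
    (hr : r.head? ≠ some c) :
    aFwd (pre ++ (List.replicate k c ++ r)) c pre.length = pre.length + k := by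
  induction k generalizing pre with
  | zero =>
    rw [aFwd]
    have : (pre ++ (List.replicate 0 c ++ r))[pre.length]? = r.head? := by
      simp only [List.replicate]
      rw [List.nil_append, List.getElem?_append_right (Nat.le_refl _)]
      simp [List.head?_eq_getElem?]
    rw [dif_neg (by rw [this]; tauto)]
    omega
  | succ k ih =>
    rw [aFwd]
    have hget : (pre ++ (List.replicate (k + 1) c ++ r))[pre.length]? = some c := by
      rw [List.replicate_succ, List.cons_append, pv_get?_at]
    have hlen : pre.length < (pre ++ (List.replicate (k + 1) c ++ r)).length := by
      have := List.getElem?_eq_some_iff.mp hget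
      exact this.1
    rw [dif_pos ⟨hlen, hget⟩]
    have hre : pre ++ (List.replicate (k + 1) c ++ r)
        = (pre ++ [c]) ++ (List.replicate k c ++ r) := by
      rw [List.replicate_succ]; simp
    have hlen1 : pre.length + 1 = (pre ++ [c]).length := by simp
    rw [hre, hlen1, ih (pre ++ [c])]
    simp
    omega

theorem aBwd_run (s : List Char) (q : List Char) (c : Char) (k k' : Nat) (r : List Char)
    (hs : s = q ++ (List.replicate k c ++ r)) (hk : k' ≤ k)
    (hq : q = [] ∨ ∃ q' d, q = q' ++ [d] ∧ d ≠ c) :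
    aBwd s c ((q.length : Int) + k' - 1) = (q.length : Int) - 1 := by
  induction k' with
  | zero =>
    have hidx : (q.length : Int) + ((0 : Nat) : Int) - 1 = (q.length : Int) - 1 := by push_cast; ring
    rw [hidx, aBwd]
    rcases hq with hq | ⟨q', d, hq, hd⟩
    · subst hq
      rw [dif_neg (by simp)]
    · have hj : (0 : Int) ≤ (q.length : Int) - 1 := by subst hq; simp
      have htoNat : ((q.length : Int) - 1).toNat = q'.length := by subst hq; simp
      have hget : PySem.List.pyGet? s ((q.length : Int) - 1) = some d := by
        rw [PySem.List.pyGet?_of_nonneg _ hj, htoNat, hs, hq]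
        have hre : q' ++ [d] ++ (List.replicate k c ++ r)
            = q' ++ d :: (List.replicate k c ++ r) := by simp
        rw [hre, pv_get?_at]
      rw [dif_neg (by rw [hget]; simp [hd])]
  | succ k' ih =>
    rw [aBwd]
    have hj : (0 : Int) ≤ (q.length : Int) + ((k' + 1 : Nat) : Int) - 1 := by push_cast; omega
    have htoNat : ((q.length : Int) + ((k' + 1 : Nat) : Int) - 1).toNat = q.length + k' := by
      push_cast; omega
    have hget : PySem.List.pyGet? s ((q.length : Int) + ((k' + 1 : Nat) : Int) - 1) = some c := by
      rw [PySem.List.pyGet?_of_nonneg _ hj, htoNat, hs]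
      have hsplit : List.replicate k c
          = List.replicate k' c ++ c :: List.replicate (k - k' - 1) c := by
        have h1 : k = k' + (k - k' - 1) + 1 := by omega
        conv_lhs => rw [h1]
        rw [List.replicate_succ', List.replicate_add, List.append_assoc,
          ← List.replicate_succ', List.replicate_succ]
      rw [hsplit]
      have hre : q ++ ((List.replicate k' c ++ c :: List.replicate (k - k' - 1) c) ++ r)
          = (q ++ List.replicate k' c) ++ c :: (List.replicate (k - k' - 1) c ++ r) := by simp
      rw [hre]
      have hl : q.length + k' = (q ++ List.replicate k' c).length := by simp
      rw [hl, pv_get?_at]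
    rw [dif_pos ⟨hj, hget⟩]
    have harg : (q.length : Int) + ((k' + 1 : Nat) : Int) - 1 - 1
        = (q.length : Int) + (k' : Int) - 1 := by push_cast; ring
    rw [harg, ih (by omega)]

theorem aBwd_spec (q : List Char) (c : Char) (k : Nat) (r : List Char)
    (hq : q = [] ∨ ∃ q' d, q = q' ++ [d] ∧ d ≠ c) :
    aBwd (q ++ (List.replicate k c ++ r)) c ((q.length : Int) + k - 1) =
      (q.length : Int) - 1 := by
  exact aBwd_run _ q c k k r rfl (Nat.le_refl k) hq

theorem dfaE_L_run (c : Char) (k' m : Nat) (r : List Char) :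
    dfaE (.L c k') (List.replicate m c ++ r) = dfaE (.L c (k' + m)) r := by
  induction m generalizing k' with
  | zero => simp
  | succ m ih =>
    simp only [List.replicate_succ, List.cons_append, dfaE, pvStep, if_pos]
    simp only [ih]
    have : k' + 1 + m = k' + (m + 1) := by omega
    simp [this]

theorem pvShaftOpt_none (o : Option Char) (h : pvShaftOpt o = none) :
    o ≠ some '-' ∧ o ≠ some '=' := by
  cases o with
  | none => simp
  | some d =>
    by_cases hd : d = '-' ∨ d = '='
    · rw [pvShaftOpt, if_pos hd] at h; exact absurd h (by simp)
    · constructor <;> intro hh <;> apply hd <;> simp at hh <;> simp [hh]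

theorem pvShaftOpt_some (o : Option Char) (c : Char) (h : pvShaftOpt o = some c) :
    o = some c ∧ (c = '-' ∨ c = '=') := by
  cases o with
  | none => exact absurd h (by simp [pvShaftOpt])
  | some d =>
    by_cases hd : d = '-' ∨ d = '='
    · rw [pvShaftOpt, if_pos hd] at h
      cases h; exact ⟨rfl, hd⟩
    · rw [pvShaftOpt, if_neg hd] at h; exact absurd h (by simp)

theorem pvShaftOpt_not (d : Char) (h1 : d ≠ '-') (h2 : d ≠ '=') :
    pvShaftOpt (some d) = none := by
  rw [pvShaftOpt, if_neg (by tauto)]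

theorem pvShaftOpt_shaft (c : Char) (hc : c = '-' ∨ c = '=') :
    pvShaftOpt (some c) = some c := by
  rw [pvShaftOpt, if_pos hc]

theorem shaft_ne (c : Char) (hc : c = '-' ∨ c = '=') : c ≠ '<' ∧ c ≠ '>' := by
  rcases hc with h | h <;> subst h <;> exact ⟨by decide, by decide⟩

theorem pvIsShaft_true (x : Char) (h : x = '-' ∨ x = '=') : pvIsShaft x = true := by
  rcases h with h | h <;> subst h <;> decide

theorem pvIsShaft_false (x : Char) (h1 : x ≠ '-') (h2 : x ≠ '=') : pvIsShaft x = false := by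
  simp [pvIsShaft, h1, h2]

theorem dfaE_l_run (c : Char) (hc : c = '-' ∨ c = '=') (K : Nat) (hK : 1 ≤ K)
    (r : List Char) :
    dfaE .l (List.replicate K c ++ r) = dfaE (.L c K) r := by
  obtain ⟨K0, rfl⟩ : ∃ K0, K = K0 + 1 := ⟨K - 1, by omega⟩
  rw [List.replicate_succ, List.cons_append]
  have h1 := (shaft_ne c hc).1
  have h2 := (shaft_ne c hc).2
  simp only [dfaE, pvStep, if_neg h1, if_neg h2, pvIsShaft_true c hc, if_true]
  rw [dfaE_L_run, Nat.add_comm]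
  simp

theorem pvMain (N : Nat) : ∀ (l : List Char), l.length ≤ N → ∀ (st : PvSt) (p : List Char)
    (a : Int), pvRel st p → pvCompat st l →
    aLoop (p ++ l) a p.length = a + pvCorr st l + dfaE st l := by
  induction N with
  | zero =>
    intro l hl st p a hrel _
    have hnil : l = [] := List.eq_nil_of_length_eq_zero (by omega)
    subst hnil
    rw [List.append_nil, aLoop, dif_neg (by omega)]
    cases st <;> simp [pvCorr, dfaE, pvFlush] <;> ring
  | succ n ih =>
    intro l hl st p a hrel hcompat
    cases l with
    | nil =>
      rw [List.append_nil, aLoop, dif_neg (by omega)]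
      cases st <;> simp [pvCorr, dfaE, pvFlush] <;> ring
    | cons x l' =>
      have hl' : l'.length ≤ n := by simp at hl; omega
      have hi : p.length < (p ++ x :: l').length := by simp
      rw [aLoop, dif_pos hi]
      simp only [pv_get_mid p l' x hi]
      by_cases hx1 : x = '<'
      · -- ======== A's '<' branch ========
        subst hx1
        rw [if_pos rfl, pv_get?_succ]
        cases hopt : pvShaftOpt l'.head? with
        | none =>
          -- bare '<'
          simp only [hopt]
          have hre : p ++ '<' :: l' = (p ++ ['<']) ++ l' := by simp
          have hlen : p.length + 1 = (p ++ ['<']).length := by simp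
          rw [hre, hlen,
            ih l' hl' .l (p ++ ['<']) (a - 1) ⟨p, rfl⟩ (pvShaftOpt_none _ hopt)]
          cases st with
          | n => simp [pvCorr, dfaE, pvStep]
          | l => simp [pvCorr, dfaE, pvStep]
          | L c k =>
            have hne := (shaft_ne c hrel.1).1
            simp [pvCorr, dfaE, pvStep, Ne.symm hne]
            try ring
          | R c k =>
            have hne := (shaft_ne c hrel.1).1
            simp [pvCorr, dfaE, pvStep, Ne.symm hne]
            try ring
        | some c =>
          -- '<' followed by a homogeneous shaft run of c
          simp only [hopt]
          obtain ⟨hhead, hc⟩ := pvShaftOpt_some _ _ hopt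
          obtain ⟨hsplit, hrhead⟩ := runSplit_spec c l'
          set K := (runSplit c l').1 with hKdef
          set r := (runSplit c l').2 with hrdef
          have hK : 1 ≤ K := by
            rcases Nat.eq_zero_or_pos K with h0 | h0
            · rw [h0] at hsplit; simp at hsplit
              rw [hsplit] at hhead; exact absurd hhead hrhead
            · exact h0
          have hassoc : p ++ '<' :: l' = (p ++ '<' :: List.replicate K c) ++ r := by
            rw [hsplit]; simp
          have hPlen : (p ++ '<' :: List.replicate K c).length = p.length + 1 + K := by
            simp
            try omega
          have hj : aFwd (p ++ '<' :: l') c (p.length + 1) = p.length + 1 + K := by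
            have h1 : p ++ '<' :: l' = (p ++ ['<']) ++ (List.replicate K c ++ r) := by
              rw [hsplit]; simp
            have h2 : p.length + 1 = (p ++ ['<']).length := by simp
            rw [h1, h2, aFwd_spec _ _ _ _ hrhead]
            try simp
            try omega
          rw [hj]
          have hget : (p ++ '<' :: l')[p.length + 1 + K]? = r.head? := by
            rw [hassoc, ← hPlen, List.getElem?_append_right (Nat.le_refl _)]
            simp [List.head?_eq_getElem?]
          rw [hget]
          have hrlen : r.length ≤ n := by
            have : l'.length = K + r.length := by rw [hsplit]; simp
            omega
          have hRHS : a + pvCorr st ('<' :: l') + dfaE st ('<' :: l')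
              = a + dfaE (.L c K) r := by
            have hrun : dfaE PvSt.l l' = dfaE (.L c K) r := by
              rw [hsplit]; exact dfaE_l_run c hc K hK r
            cases st with
            | n => simp [pvCorr, dfaE, pvStep, hrun]
            | l => simp [pvCorr, dfaE, pvStep, hrun]; try ring
            | L c0 k0 =>
              have hne := (shaft_ne c0 hrel.1).1
              simp [pvCorr, dfaE, pvStep, Ne.symm hne, hrun]
              try ring
            | R c0 k0 =>
              have hne := (shaft_ne c0 hrel.1).1
              simp [pvCorr, dfaE, pvStep, Ne.symm hne, hrun]
          by_cases hr : r.head? = some '>'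
          · -- double-sided: A continues at the '>' without charging
            rw [if_pos hr]
            have hcomp2 : pvCompat (.L c K) r := by
              simp only [pvCompat]; rw [hr]
              simp [Ne.symm ((shaft_ne c hc).2)]
            have hcall := ih r hrlen (.L c K) (p ++ '<' :: List.replicate K c) a
              ⟨hc, hK, p, rfl⟩ hcomp2
            rw [hPlen] at hcall
            rw [hassoc, hcall, hRHS]
            simp [pvCorr, hr]
          · -- completed left arrow
            rw [if_neg hr]
            have hcomp2 : pvCompat (.L c K) r := hrhead
            have hcall := ih r hrlen (.L c K) (p ++ '<' :: List.replicate K c)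
              (a - ((↑(p.length + 1 + K) : Int) - ↑p.length) * (if c = '=' then 2 else 1))
              ⟨hc, hK, p, rfl⟩ hcomp2
            rw [hPlen] at hcall
            rw [hassoc, hcall, hRHS]
            have hcast : ((↑(p.length + 1 + K) : Int) - ↑p.length) = (K : Int) + 1 := by
              push_cast; ring
            rw [hcast]
            simp [pvCorr, hr, pvMult]
            try ring
      · by_cases hx2 : x = '>'
        · -- ======== A's '>' branch ========
          subst hx2
          rw [if_neg hx1, if_pos rfl]
          -- common tail: a bare/charged '>' step moves on to p ++ ['>']
          have hre : p ++ '>' :: l' = (p ++ ['>']) ++ l' := by simp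
          have hlen : p.length + 1 = (p ++ ['>']).length := by simp
          have hreln : pvRel .n (p ++ ['>']) :=
            Or.inr ⟨p, '>', rfl, by decide, by decide, by decide⟩
          cases st with
          | n =>
            rcases hrel with hp | ⟨q, d, hp, hd1, hd2, hd3⟩
            · have h0 : ¬ (1 ≤ p.length) := by rw [hp]; simp
              simp only [if_neg h0]
              rw [hre, hlen, ih l' hl' .n (p ++ ['>']) (a + 1) hreln trivial]
              simp [pvCorr, dfaE, pvStep]
              try ring
            · have hp1 : 1 ≤ p.length := by rw [hp]; simp
              have hpen : (p ++ '>' :: l')[p.length - 1]? = some d := by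
                rw [hp]
                have h1 : (q ++ [d]) ++ '>' :: l' = q ++ d :: ('>' :: l') := by simp
                have h2 : (q ++ [d]).length - 1 = q.length := by simp
                rw [h1, h2, pv_get?_at]
              simp only [if_pos hp1, hpen, pvShaftOpt_not d hd2 hd3]
              rw [hre, hlen, ih l' hl' .n (p ++ ['>']) (a + 1) hreln trivial]
              simp [pvCorr, dfaE, pvStep]
              try ring
          | l =>
            obtain ⟨q, hp⟩ := hrel
            have hp1 : 1 ≤ p.length := by rw [hp]; simp
            have hpen : (p ++ '>' :: l')[p.length - 1]? = some '<' := by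
              rw [hp]
              have h1 : (q ++ ['<']) ++ '>' :: l' = q ++ '<' :: ('>' :: l') := by simp
              have h2 : (q ++ ['<']).length - 1 = q.length := by simp
              rw [h1, h2, pv_get?_at]
            simp only [if_pos hp1, hpen, pvShaftOpt_not '<' (by decide) (by decide)]
            rw [hre, hlen, ih l' hl' .n (p ++ ['>']) (a + 1) hreln trivial]
            simp [pvCorr, dfaE, pvStep]
            try ring
          | R c k =>
            obtain ⟨hc, hk, q, hp, hq⟩ := hrel
            have hcne := shaft_ne c hc
            have hp1 : 1 ≤ p.length := by rw [hp]; simp; omega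
            have hpen : (p ++ '>' :: l')[p.length - 1]? = some c := by
              obtain ⟨k0, rfl⟩ : ∃ k0, k = k0 + 1 := ⟨k - 1, by omega⟩
              rw [hp, List.replicate_succ']
              have h1 : (q ++ (List.replicate k0 c ++ [c])) ++ '>' :: l'
                  = (q ++ List.replicate k0 c) ++ c :: ('>' :: l') := by simp
              have h2 : (q ++ (List.replicate k0 c ++ [c])).length - 1
                  = (q ++ List.replicate k0 c).length := by simp
              rw [h1, h2, pv_get?_at]
            simp only [if_pos hp1, hpen, pvShaftOpt_shaft c hc]
            have hbwd : aBwd (p ++ '>' :: l') c ((p.length : Int) - 1)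
                = (q.length : Int) - 1 := by
              have h1 : p ++ '>' :: l' = q ++ (List.replicate k c ++ ('>' :: l')) := by
                rw [hp]; simp
              have h2 : ((p.length : Int) - 1) = (q.length : Int) + k - 1 := by
                rw [hp]; push_cast; simp
              rw [h1, h2, aBwd_spec q c k _ (by
                rcases hq with h | ⟨q', d, hqd, hdc, _⟩
                · exact Or.inl h
                · exact Or.inr ⟨q', d, hqd, hdc⟩)]
            simp only [hbwd]
            have hcond : ¬ (((p.length : Int) - ((q.length : Int) - 1) - 1) ≠ 0 ∧
                (0 : Int) ≤ (q.length : Int) - 1 ∧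
                PySem.List.pyGet? (p ++ '>' :: l') ((q.length : Int) - 1) = some '<') := by
              rcases hq with hq0 | ⟨q', d, hqd, hdc, hdlt⟩
              · subst hq0; intro h
                have := h.2.1; simp at this
              · intro h
                have hg : PySem.List.pyGet? (p ++ '>' :: l') ((q.length : Int) - 1)
                    = some d := by
                  rw [hp, hqd]
                  have h1 : ((q' ++ [d]) ++ List.replicate k c) ++ '>' :: l'
                      = q' ++ d :: (List.replicate k c ++ '>' :: l') := by simp
                  have h2 : (((q' ++ [d]).length : Int) - 1) = (q'.length : Int) := by
                    simp
                  rw [h1, h2, PySem.List.pyGet?_append_length]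
                rw [hg] at h
                exact hdlt (by simpa using h.2.2)
            rw [if_neg hcond]
            have hlval : ((p.length : Int) - ((q.length : Int) - 1) - 1) + 1
                = (k : Int) + 1 := by
              rw [hp]; push_cast; simp; try ring
            rw [hlval, hre, hlen,
              ih l' hl' .n (p ++ ['>'])
                (a + ((k : Int) + 1) * (if c = '=' then 2 else 1)) hreln trivial]
            simp [pvCorr, dfaE, pvStep, Ne.symm hcne.2, pvMult]
            try ring
          | L c k =>
            obtain ⟨hc, hk, q, hp⟩ := hrel
            have hcne := shaft_ne c hc
            have hp1 : 1 ≤ p.length := by rw [hp]; simp; omega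
            have hpen : (p ++ '>' :: l')[p.length - 1]? = some c := by
              obtain ⟨k0, rfl⟩ : ∃ k0, k = k0 + 1 := ⟨k - 1, by omega⟩
              rw [hp, List.replicate_succ']
              have h1 : (q ++ '<' :: (List.replicate k0 c ++ [c])) ++ '>' :: l'
                  = (q ++ '<' :: List.replicate k0 c) ++ c :: ('>' :: l') := by simp
              have h2 : (q ++ '<' :: (List.replicate k0 c ++ [c])).length - 1
                  = (q ++ '<' :: List.replicate k0 c).length := by simp
              rw [h1, h2, pv_get?_at]
            simp only [if_pos hp1, hpen, pvShaftOpt_shaft c hc]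
            have hbwd : aBwd (p ++ '>' :: l') c ((p.length : Int) - 1)
                = (q.length : Int) := by
              have h1 : p ++ '>' :: l' = (q ++ ['<']) ++ (List.replicate k c ++ ('>' :: l')) := by
                rw [hp]; simp
              have h2 : ((p.length : Int) - 1) = ((q ++ ['<']).length : Int) + k - 1 := by
                rw [hp]; push_cast; simp; try ring
              rw [h1, h2, aBwd_spec (q ++ ['<']) c k _
                (Or.inr ⟨q, '<', rfl, Ne.symm hcne.1⟩)]
              simp
            simp only [hbwd]
            have hcond : (((p.length : Int) - (q.length : Int) - 1) ≠ 0 ∧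
                (0 : Int) ≤ (q.length : Int) ∧
                PySem.List.pyGet? (p ++ '>' :: l') ((q.length : Int)) = some '<') := by
              refine ⟨by rw [hp]; push_cast; simp; omega, by positivity, ?_⟩
              rw [hp]
              have h1 : (q ++ '<' :: List.replicate k c) ++ '>' :: l'
                  = q ++ '<' :: (List.replicate k c ++ '>' :: l') := by simp
              rw [h1, PySem.List.pyGet?_append_length]
            rw [if_pos hcond, hre, hlen, ih l' hl' .n (p ++ ['>']) a hreln trivial]
            simp [pvCorr, dfaE, pvStep, Ne.symm hcne.2]
        · -- ======== A's else branch: any other character ========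
          rw [if_neg hx1, if_neg hx2]
          have hre : p ++ x :: l' = (p ++ [x]) ++ l' := by simp
          have hlen : p.length + 1 = (p ++ [x]).length := by simp
          rw [hre, hlen]
          cases st with
          | n =>
            by_cases hxs : x = '-' ∨ x = '='
            · have hrel2 : pvRel (.R x 1) (p ++ [x]) := by
                refine ⟨hxs, le_refl 1, p, by simp, ?_⟩
                rcases hrel with hp | ⟨q, d, hp, hd1, hd2, hd3⟩
                · exact Or.inl hp
                · refine Or.inr ⟨q, d, hp, ?_, hd1⟩
                  rcases hxs with h | h <;> subst h <;> assumption
              rw [ih l' hl' (.R x 1) (p ++ [x]) a hrel2 trivial]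
              simp [pvCorr, dfaE, pvStep, hx1, hx2, pvIsShaft_true x hxs]
            · push_neg at hxs
              have hrel2 : pvRel .n (p ++ [x]) := Or.inr ⟨p, x, rfl, hx1, hxs.1, hxs.2⟩
              rw [ih l' hl' .n (p ++ [x]) a hrel2 trivial]
              simp [pvCorr, dfaE, pvStep, hx1, hx2, pvIsShaft_false x hxs.1 hxs.2]
          | l =>
            obtain ⟨q, hp⟩ := hrel
            have hxs : x ≠ '-' ∧ x ≠ '=' := by
              constructor <;> intro hh <;> subst hh <;>
                simp [pvCompat] at hcompat
            have hrel2 : pvRel .n (p ++ [x]) := Or.inr ⟨p, x, rfl, hx1, hxs.1, hxs.2⟩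
            rw [ih l' hl' .n (p ++ [x]) a hrel2 trivial]
            simp [pvCorr, dfaE, pvStep, hx1, hx2, pvIsShaft_false x hxs.1 hxs.2]
            try ring
          | L c k =>
            obtain ⟨hc, hk, q, hp⟩ := hrel
            have hcne := shaft_ne c hc
            have hxc : x ≠ c := by
              intro hh; subst hh; simp [pvCompat] at hcompat
            have hxgt : x :: l' ≠ [] := by simp
            by_cases hxs : x = '-' ∨ x = '='
            · have hrel2 : pvRel (.R x 1) (p ++ [x]) := by
                refine ⟨hxs, le_refl 1, p, by simp, ?_⟩
                obtain ⟨k0, rfl⟩ : ∃ k0, k = k0 + 1 := ⟨k - 1, by omega⟩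
                refine Or.inr ⟨q ++ '<' :: List.replicate k0 c, c, ?_, Ne.symm hxc, hcne.1⟩
                rw [hp, List.replicate_succ']
                simp
              rw [ih l' hl' (.R x 1) (p ++ [x]) a hrel2 trivial]
              have hhne : x ≠ '>' := hx2
              simp [pvCorr, dfaE, pvStep, hxc, hx1, hx2, pvIsShaft_true x hxs]
              try ring
            · push_neg at hxs
              have hrel2 : pvRel .n (p ++ [x]) := Or.inr ⟨p, x, rfl, hx1, hxs.1, hxs.2⟩
              rw [ih l' hl' .n (p ++ [x]) a hrel2 trivial]
              simp [pvCorr, dfaE, pvStep, hxc, hx1, hx2, pvIsShaft_false x hxs.1 hxs.2]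
              try ring
          | R c k =>
            obtain ⟨hc, hk, q, hp, hq⟩ := hrel
            have hcne := shaft_ne c hc
            by_cases hxc : x = c
            · subst hxc
              have hrel2 : pvRel (.R x (k + 1)) (p ++ [x]) := by
                refine ⟨hc, by omega, q, ?_, hq⟩
                rw [hp, List.replicate_succ']
                simp
              rw [ih l' hl' (.R x (k + 1)) (p ++ [x]) a hrel2 trivial]
              simp [pvCorr, dfaE, pvStep]
            · by_cases hxs : x = '-' ∨ x = '='
              · have hrel2 : pvRel (.R x 1) (p ++ [x]) := by
                  refine ⟨hxs, le_refl 1, p, by simp, ?_⟩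
                  obtain ⟨k0, rfl⟩ : ∃ k0, k = k0 + 1 := ⟨k - 1, by omega⟩
                  refine Or.inr ⟨q ++ List.replicate k0 c, c, ?_, Ne.symm hxc, hcne.1⟩
                  rw [hp, List.replicate_succ']
                  simp
                rw [ih l' hl' (.R x 1) (p ++ [x]) a hrel2 trivial]
                simp [pvCorr, dfaE, pvStep, hxc, hx1, hx2, pvIsShaft_true x hxs]
              · push_neg at hxs
                have hrel2 : pvRel .n (p ++ [x]) := Or.inr ⟨p, x, rfl, hx1, hxs.1, hxs.2⟩
                rw [ih l' hl' .n (p ++ [x]) a hrel2 trivial]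
                simp [pvCorr, dfaE, pvStep, hxc, hx1, hx2, pvIsShaft_false x hxs.1 hxs.2]

-- ===== VERDICT (by name: the statement is the Claim_ definition above) =====
theorem arrow_search_spec : Claim_equal_arrow_search := by
  intro s _
  unfold Spec_arrow_search arrow_search arrow_search_alt
  rw [pvFlush_foldl]
  have h := pvMain s.toList.length s.toList le_rfl .n [] 0 (Or.inl rfl) trivial
  simpa [pvCorr] using h
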